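-- pv_equiv track=rewrite | github.com/KaidiJ/DataMining_SparkRDD | 553hw4/task2_1_pass.py | compute_shortest_paths
-- ===== SOURCE A (Python) =====
-- from collections import defaultdict
-- import queue
--
-- def compute_shortest_paths(root, adj_list):
--     """计算给定根节点的最短路径和路径数量"""
--     q = queue.Queue()
--     q.put(root)
--     visited = {root: 0}
--     parents = defaultdict(list)
--     num_paths = defaultdict(int)
--     num_paths[root] = 1
--
--     while not q.empty():
--         node = q.get()
--         for neighbor in adj_list[node]:
--             if neighbor not in visited:
--                 visited[neighbor] = visited[node] + 1
--                 q.put(neighbor)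
--             if visited[neighbor] == visited[node] + 1:
--                 parents[neighbor].append(node)
--                 num_paths[neighbor] += num_paths[node]
--
--     return parents, num_paths, visited
-- ===== SOURCE B (Python) =====
-- from collections import defaultdict
--
--
-- def compute_shortest_paths(root, adj_list):
--     """Two staged passes instead of one fused BFS loop: pass 1 is a plain BFS
--     that computes only the distances and the discovery order; pass 2 sweeps the
--     traversed edges again and rebuilds the parent DAG and the path counts from
--     the final distances (valid because BFS never overwrites a distance)."""
--     visited = {root: 0}
--     order = [root]
--     for u in order:  # order grows while we iterate: index-based BFS
--         for w in adj_list[u]: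
--             if w not in visited:
--                 visited[w] = visited[u] + 1
--                 order.append(w)
--     parents = defaultdict(list)
--     num_paths = defaultdict(int)
--     num_paths[root] = 1
--     for u in order:
--         for w in adj_list[u]:
--             if visited[w] == visited[u] + 1:
--                 parents[w].append(u)
--                 num_paths[w] += num_paths[u]
--     return parents, num_paths, visited
-- ===== Notes on version B (the rewrite author's own statement) =====
-- stated objective: alternative
-- what changed: Splits A's single fused BFS loop (which maintains distances, parents and path counts simultaneously while draining a FIFO queue) into two staged passes: a distance-only BFS first, then a separate sweep over the traversed edges that rebuilds the parent DAG and path counts from the final distances.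
import Mathlib
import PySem

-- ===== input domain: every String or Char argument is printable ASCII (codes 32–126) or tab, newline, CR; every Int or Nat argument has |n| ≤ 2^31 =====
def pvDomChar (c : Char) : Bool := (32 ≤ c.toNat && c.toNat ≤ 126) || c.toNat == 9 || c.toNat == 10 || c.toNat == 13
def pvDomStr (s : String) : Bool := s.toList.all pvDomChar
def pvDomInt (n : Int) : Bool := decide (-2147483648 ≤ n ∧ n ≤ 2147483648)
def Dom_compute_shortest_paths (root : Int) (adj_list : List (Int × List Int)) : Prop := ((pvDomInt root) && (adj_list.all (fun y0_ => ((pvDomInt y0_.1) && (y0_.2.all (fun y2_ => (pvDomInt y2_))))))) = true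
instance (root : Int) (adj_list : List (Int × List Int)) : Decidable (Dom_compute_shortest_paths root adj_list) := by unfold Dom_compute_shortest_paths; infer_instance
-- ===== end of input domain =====

-- B replaces A's single fused BFS loop (distances, parents and path counts maintained together
-- while draining a FIFO queue) by two staged passes: a distance-only BFS, then a separate sweep
-- over the traversed edges deriving parents and path counts from the final distances.

-- ===== PORT A =====
-- A's inner 'for neighbor in adj_list[node]' loop; the BFS queue is threaded through and
-- appended to exactly where A does 'q.put(neighbor)'.
def cspInner (node : Int) : List Int →
    (PySem.Dict Int Int × PySem.Dict Int (List Int) × PySem.Dict Int Int) → List Int →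
    (PySem.Dict Int Int × PySem.Dict Int (List Int) × PySem.Dict Int Int) × List Int
  | [], st, q => (st, q)
  | x :: xs, (v, p, np), q =>
      let dn := v.getD node 0
      let (v1, q1) := if v.contains x then (v, q) else (v.insert x (dn + 1), q ++ [x])
      if v1.getD x 0 == dn + 1 then
        cspInner node xs (v1, p.modify x [] (· ++ [node]), np.insert x (np.getD x 0 + np.getD node 0)) q1
      else
        cspInner node xs (v1, p, np) q1

-- A's 'while not q.empty()' loop; the fuel argument only makes the recursion total and is
-- large enough to never run out (each dequeued node was enqueued once, when first visited).
def cspLoop (adj_list : List (Int × List Int)) : Nat →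
    (PySem.Dict Int Int × PySem.Dict Int (List Int) × PySem.Dict Int Int) → List Int →
    (PySem.Dict Int Int × PySem.Dict Int (List Int) × PySem.Dict Int Int)
  | 0, st, _ => st
  | _ + 1, st, [] => st
  | f + 1, st, node :: rest =>
      let (st', q') := cspInner node ((adj_list.lookup node).getD []) st rest
      cspLoop adj_list f st' q'

def compute_shortest_paths (root : Int) (adj_list : List (Int × List Int)) :
    (List (Int × List Int)) × (List (Int × Int)) × (List (Int × Int)) :=
  let fuel := adj_list.foldl (fun a p => a + p.2.length) 0 + 1
  let (v, p, np) := cspLoop adj_list fuel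
    (((PySem.Dict.empty).insert root 0), PySem.Dict.empty, (PySem.Dict.empty).insert root 1) [root]
  (p.items, np.items, v.items)

-- ===== PORT B =====
-- pass 1, body of 'for w in adj_list[u]': record distance and extend the order on discovery.
def p1Inner (u : Int) : List Int → PySem.Dict Int Int → List Int →
    PySem.Dict Int Int × List Int
  | [], d, pend => (d, pend)
  | w :: ws, d, pend =>
      if d.contains w then p1Inner u ws d pend
      else p1Inner u ws (d.insert w (d.getD u 0 + 1)) (pend ++ [w])

-- pass 1, 'for u in order' over a list that grows while iterated: 'done' is the prefix already
-- iterated, the third list the still-pending suffix; the fuel argument only makes the recursion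
-- total and is large enough to never run out (each node is appended at most once, when visited).
def p1Loop (adj_list : List (Int × List Int)) : Nat →
    PySem.Dict Int Int → List Int → List Int → PySem.Dict Int Int × List Int
  | 0, d, done, _ => (d, done)
  | _ + 1, d, done, [] => (d, done)
  | f + 1, d, done, u :: rest =>
      p1Loop adj_list f (p1Inner u ((adj_list.lookup u).getD []) d rest).1 (done ++ [u])
        (p1Inner u ((adj_list.lookup u).getD []) d rest).2

-- pass 2, body of 'for w in adj_list[u]': test against the final distances only.
def p2Inner (d : PySem.Dict Int Int) (u : Int) : List Int →
    (PySem.Dict Int (List Int) × PySem.Dict Int Int) →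
    PySem.Dict Int (List Int) × PySem.Dict Int Int
  | [], s => s
  | w :: ws, (p, np) =>
      if d.getD w 0 == d.getD u 0 + 1 then
        p2Inner d u ws (p.modify w [] (· ++ [u]), np.insert w (np.getD w 0 + np.getD u 0))
      else p2Inner d u ws (p, np)

def compute_shortest_paths_alt (root : Int) (adj_list : List (Int × List Int)) :
    (List (Int × List Int)) × (List (Int × Int)) × (List (Int × Int)) :=
  let fuel := adj_list.foldl (fun a p => a + p.2.length) 0 + 1
  let (d, order) := p1Loop adj_list fuel ((PySem.Dict.empty).insert root 0) [] [root]
  let (p, np) := order.foldl (fun s u => p2Inner d u ((adj_list.lookup u).getD []) s)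
      (PySem.Dict.empty, (PySem.Dict.empty).insert root 1)
  (p.items, np.items, d.items)

-- ===== PRECONDITION & SPEC =====
-- Python A raises KeyError (and so would B) exactly when some node reachable from root along
-- adjacency edges has no entry in adj_list; Pre_ admits exactly the inputs where A returns.
def preNbrs (adj_list : List (Int × List Int)) (a : Int) : List Int := (adj_list.lookup a).getD []

def preEdge (adj_list : List (Int × List Int)) (a b : Int) : Prop := b ∈ preNbrs adj_list a

def Pre_compute_shortest_paths (root : Int) (adj_list : List (Int × List Int)) : Prop :=
  ∀ m : Int, Relation.ReflTransGen (preEdge adj_list) root m → m ∈ adj_list.map Prod.fst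

-- decision procedure for Pre_: reachable set as a fixpoint of one-step expansion
def preExpand (adj_list : List (Int × List Int)) (S : List Int) : List Int :=
  PySem.Set.update S (S.flatMap (preNbrs adj_list))

def preIter (adj_list : List (Int × List Int)) : Nat → List Int → List Int
  | 0, S => S
  | k + 1, S => preExpand adj_list (preIter adj_list k S)

def preReach (adj_list : List (Int × List Int)) (root : Int) : List Int :=
  preIter adj_list ((adj_list.flatMap (·.2)).dedup.length + 1) [root]

def preOK (root : Int) (adj_list : List (Int × List Int)) : Bool :=
  (preReach adj_list root).all (fun m => decide (m ∈ adj_list.map Prod.fst))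

theorem pre_lookup_mem {l : List (Int × List Int)} {a : Int} {v : List Int}
    (h : l.lookup a = some v) : (a, v) ∈ l := by
  induction l with
  | nil => simp [List.lookup] at h
  | cons hd tl ih =>
    rw [List.lookup_cons] at h
    split at h
    · next heq =>
      simp only [beq_iff_eq] at heq
      injection h with h
      have : (a, v) = hd := by rw [heq, ← h]
      rw [this]
      exact List.mem_cons_self ..
    · exact List.mem_cons_of_mem _ (ih h)

theorem pre_nbrs_subset {adj_list : List (Int × List Int)} {a y : Int}
    (h : y ∈ preNbrs adj_list a) : y ∈ adj_list.flatMap (·.2) := by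
  unfold preNbrs at h
  cases hl : adj_list.lookup a with
  | none => rw [hl] at h; simp at h
  | some l =>
    rw [hl] at h
    exact List.mem_flatMap.mpr ⟨(a, l), pre_lookup_mem hl, h⟩

theorem pre_iter_sound {adj_list : List (Int × List Int)} {root : Int} :
    ∀ (k : Nat) (S : List Int), (∀ x ∈ S, Relation.ReflTransGen (preEdge adj_list) root x) →
      ∀ x ∈ preIter adj_list k S, Relation.ReflTransGen (preEdge adj_list) root x := by
  intro k
  induction k with
  | zero => exact fun S h => h
  | succ k ih =>
    intro S hS x hx
    rw [show preIter adj_list (k + 1) S = preExpand adj_list (preIter adj_list k S) from rfl,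
        preExpand, PySem.Set.mem_update _ _ _] at hx
    rcases hx with hx | hx
    · exact ih S hS x hx
    · rcases List.mem_flatMap.mp hx with ⟨a, haT, hedge⟩
      exact (ih S hS a haT).tail hedge

theorem pre_mem_expand {adj_list : List (Int × List Int)} {S : List Int} {x : Int}
    (h : x ∈ S) : x ∈ preExpand adj_list S :=
  (PySem.Set.mem_update _ _ _).mpr (Or.inl h)

theorem pre_root_mem_iter {adj_list : List (Int × List Int)} {root : Int} :
    ∀ k, root ∈ preIter adj_list k [root] := by
  intro k
  induction k with
  | zero => exact List.mem_singleton.mpr rfl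
  | succ k ih => exact pre_mem_expand ih

theorem pre_iter_nodup {adj_list : List (Int × List Int)} {root : Int} :
    ∀ k, (preIter adj_list k [root]).Nodup := by
  intro k
  induction k with
  | zero => exact List.nodup_singleton _
  | succ k ih => exact PySem.Set.nodup_update _ _ ih

theorem pre_iter_sub_univ {adj_list : List (Int × List Int)} {root : Int} :
    ∀ k, ∀ x ∈ preIter adj_list k [root], x ∈ root :: adj_list.flatMap (·.2) := by
  intro k
  induction k with
  | zero =>
    intro x hx
    have hx' : x ∈ ([root] : List Int) := hx
    rw [List.mem_singleton.mp hx']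
    exact List.mem_cons_self ..
  | succ k ih =>
    intro x hx
    rw [show preIter adj_list (k + 1) [root] = preExpand adj_list (preIter adj_list k [root]) from rfl,
        preExpand, PySem.Set.mem_update _ _ _] at hx
    rcases hx with hx | hx
    · exact ih x hx
    · rcases List.mem_flatMap.mp hx with ⟨a, _, hedge⟩
      exact List.mem_cons_of_mem _ (pre_nbrs_subset hedge)

theorem pre_nodup_length_le {l L : List Int} (h1 : l.Nodup) (h2 : ∀ x ∈ l, x ∈ L) :
    l.length ≤ L.dedup.length := by
  calc l.length = l.toFinset.card := (List.toFinset_card_of_nodup h1).symm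
  _ ≤ L.toFinset.card := Finset.card_le_card (fun x hx => by
      simp only [List.mem_toFinset] at hx ⊢; exact h2 x hx)
  _ = L.dedup.length := by rw [List.card_toFinset]

theorem pre_iter_length_le {adj_list : List (Int × List Int)} {root : Int} (k : Nat) :
    (preIter adj_list k [root]).length ≤ (adj_list.flatMap (·.2)).dedup.length + 1 := by
  have h := pre_nodup_length_le (pre_iter_nodup (adj_list := adj_list) (root := root) k)
    (pre_iter_sub_univ k)
  refine h.trans ?_
  by_cases hm : root ∈ adj_list.flatMap (·.2)
  · rw [List.dedup_cons_of_mem hm]; omega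
  · rw [List.dedup_cons_of_notMem hm]; simp

theorem pre_expand_ne_grow {adj_list : List (Int × List Int)} {S : List Int}
    (h : preExpand adj_list S ≠ S) :
    S.length + 1 ≤ (preExpand adj_list S).length := by
  have he : preExpand adj_list S =
      S ++ (PySem.Set.ofList (S.flatMap (preNbrs adj_list))).filter
        (fun y => !(PySem.Set.contains S y)) :=
    PySem.Set.update_eq_append_filter _ _
  rw [he]
  rw [he] at h
  rcases hne : (PySem.Set.ofList (S.flatMap (preNbrs adj_list))).filter
      (fun y => !(PySem.Set.contains S y)) with _ | ⟨z, zs⟩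
  · rw [hne, List.append_nil] at h
    exact absurd rfl h
  · have hlen : (S ++ z :: zs).length = S.length + (zs.length + 1) := by
      simp
    omega

theorem pre_iter_stab {adj_list : List (Int × List Int)} {S : List Int} {i : Nat}
    (h : preIter adj_list (i + 1) S = preIter adj_list i S) :
    ∀ j, preIter adj_list (i + j) S = preIter adj_list i S := by
  intro j
  induction j with
  | zero => rfl
  | succ j ih =>
    have : preIter adj_list (i + (j + 1)) S = preExpand adj_list (preIter adj_list (i + j) S) := rfl
    rw [this, ih]
    exact h

theorem pre_fix_exists {adj_list : List (Int × List Int)} {root : Int} :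
    ∃ i ≤ (adj_list.flatMap (·.2)).dedup.length,
      preIter adj_list (i + 1) [root] = preIter adj_list i [root] := by
  by_contra hfix
  push Not at hfix
  set D := (adj_list.flatMap (·.2)).dedup.length with hD
  have hlen : ∀ i ≤ D + 1, i + 1 ≤ (preIter adj_list i [root]).length := by
    intro i
    induction i with
    | zero =>
      intro _
      have h0 : preIter adj_list 0 [root] = [root] := rfl
      rw [h0]
      simp
    | succ i ih =>
      intro hile
      have h1 := ih (by omega)
      have hne := hfix i (by omega)
      have h2 := pre_expand_ne_grow (S := preIter adj_list i [root]) (adj_list := adj_list) hne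
      have : preIter adj_list (i + 1) [root] = preExpand adj_list (preIter adj_list i [root]) := rfl
      rw [this]
      omega
  have := hlen (D + 1) (le_refl _)
  have := pre_iter_length_le (adj_list := adj_list) (root := root) (D + 1)
  omega

theorem pre_reach_fix {adj_list : List (Int × List Int)} {root : Int} :
    preExpand adj_list (preReach adj_list root) = preReach adj_list root := by
  rcases pre_fix_exists (adj_list := adj_list) (root := root) with ⟨i, hi, hfix⟩
  set D := (adj_list.flatMap (·.2)).dedup.length with hD
  have hstab := pre_iter_stab (S := ([root] : List Int)) hfix
  have h1 : preReach adj_list root = preIter adj_list i [root] := by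
    have := hstab (D + 1 - i)
    rw [show i + (D + 1 - i) = D + 1 by omega] at this
    exact this
  have h2 : preExpand adj_list (preIter adj_list i [root]) = preIter adj_list i [root] := hfix
  rw [h1, h2]

theorem pre_reach_complete {adj_list : List (Int × List Int)} {root m : Int}
    (h : Relation.ReflTransGen (preEdge adj_list) root m) : m ∈ preReach adj_list root := by
  induction h with
  | refl => exact pre_root_mem_iter _
  | tail _ hedge ih =>
    rename_i b c _
    have : c ∈ (preReach adj_list root).flatMap (preNbrs adj_list) :=
      List.mem_flatMap.mpr ⟨b, ih, hedge⟩
    have : c ∈ preExpand adj_list (preReach adj_list root) :=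
      (PySem.Set.mem_update _ _ _).mpr (Or.inr this)
    rwa [pre_reach_fix] at this

theorem pre_iff (root : Int) (adj_list : List (Int × List Int)) :
    preOK root adj_list = true ↔ Pre_compute_shortest_paths root adj_list := by
  constructor
  · intro hOK m hm
    have := List.all_eq_true.mp hOK m (pre_reach_complete hm)
    exact of_decide_eq_true this
  · intro hPre
    refine List.all_eq_true.mpr (fun x hx => decide_eq_true ?_)
    refine hPre x (pre_iter_sound _ [root] ?_ x hx)
    intro y hy
    rw [List.mem_singleton.mp hy]

instance (root : Int) (adj_list : List (Int × List Int)) :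
    Decidable (Pre_compute_shortest_paths root adj_list) :=
  decidable_of_iff (preOK root adj_list = true) (pre_iff root adj_list)

def pvWitness_compute_shortest_paths : Int × (List (Int × List Int)) :=
  (0, [(0, [1, 2]), (1, [2]), (2, [])])

def Spec_compute_shortest_paths (root : Int) (adj_list : List (Int × List Int))
    (out : (List (Int × List Int)) × (List (Int × Int)) × (List (Int × Int))) : Prop :=
  out = compute_shortest_paths_alt root adj_list
instance (root : Int) (adj_list : List (Int × List Int))
    (out : (List (Int × List Int)) × (List (Int × Int)) × (List (Int × Int))) :
    Decidable (Spec_compute_shortest_paths root adj_list out) := by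
  unfold Spec_compute_shortest_paths; infer_instance

-- ===== CLAIM (what is proved, stated in full; the proofs are below) =====
def Claim_equal_compute_shortest_paths : Prop := ∀ (root : Int) (adj_list : List (Int × List Int)), Dom_compute_shortest_paths root adj_list → Pre_compute_shortest_paths root adj_list → Spec_compute_shortest_paths root adj_list (compute_shortest_paths root adj_list)

-- ===== LEMMAS AND PROOFS =====
-- The equality of the two ports is in fact unconditional. Proof plan: A's fused loop is
-- simulated against B's pass 1 (their visited-dict and queue evolutions are literally equal),
-- while A's (parents, num_paths) updates coincide with B's pass-2 updates because the
-- distances A consults at processing time equal the final distances (pass 1 never overwrites).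

-- proof-only view of pass 1: final distances plus the order of nodes processed FROM HERE ON
def p1Run (adj_list : List (Int × List Int)) : Nat →
    PySem.Dict Int Int → List Int → PySem.Dict Int Int × List Int
  | 0, d, _ => (d, [])
  | _ + 1, d, [] => (d, [])
  | f + 1, d, u :: rest =>
      ((p1Run adj_list f (p1Inner u ((adj_list.lookup u).getD []) d rest).1
          (p1Inner u ((adj_list.lookup u).getD []) d rest).2).1,
       u :: (p1Run adj_list f (p1Inner u ((adj_list.lookup u).getD []) d rest).1
          (p1Inner u ((adj_list.lookup u).getD []) d rest).2).2)

theorem p1Loop_eq_run (adj_list : List (Int × List Int)) :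
    ∀ (f : Nat) (d : PySem.Dict Int Int) (done pend : List Int),
      p1Loop adj_list f d done pend =
        ((p1Run adj_list f d pend).1, done ++ (p1Run adj_list f d pend).2) := by
  intro f
  induction f with
  | zero => intro d done pend; simp [p1Loop, p1Run]
  | succ f ih =>
    intro d done pend
    cases pend with
    | nil => simp [p1Loop, p1Run]
    | cons u rest =>
      simp only [p1Loop, p1Run, ih]
      simp

theorem p1Inner_mono (u : Int) :
    ∀ (nbrs : List Int) (d : PySem.Dict Int Int) (q : List Int) (k : Int),
      d.contains k = true →
      (p1Inner u nbrs d q).1.contains k = true ∧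
        (p1Inner u nbrs d q).1.getD k 0 = d.getD k 0 := by
  intro nbrs
  induction nbrs with
  | nil => intro d q k hk; exact ⟨hk, rfl⟩
  | cons w ws ih =>
    intro d q k hk
    simp only [p1Inner]
    by_cases hw : d.contains w
    · rw [if_pos hw]; exact ih d q k hk
    · rw [if_neg hw]
      have hkw : k ≠ w := fun h => hw (h ▸ hk)
      have hc : (d.insert w (d.getD u 0 + 1)).contains k = true := by
        rw [PySem.Dict.contains_insert]
        simp [hk]
      have hg : (d.insert w (d.getD u 0 + 1)).getD k 0 = d.getD k 0 :=
        PySem.Dict.getD_insert_of_ne _ _ _ hkw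
      rcases ih (d.insert w (d.getD u 0 + 1)) (q ++ [w]) k hc with ⟨h1, h2⟩
      exact ⟨h1, h2.trans hg⟩

theorem p1Inner_queue (u : Int) :
    ∀ (nbrs : List Int) (d : PySem.Dict Int Int) (q : List Int),
      (∀ k ∈ q, d.contains k = true) →
      ∀ k ∈ (p1Inner u nbrs d q).2, (p1Inner u nbrs d q).1.contains k = true := by
  intro nbrs
  induction nbrs with
  | nil => intro d q hq k hk; exact hq k hk
  | cons w ws ih =>
    intro d q hq
    simp only [p1Inner]
    by_cases hw : d.contains w
    · rw [if_pos hw]; exact ih d q hq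
    · rw [if_neg hw]
      refine ih (d.insert w (d.getD u 0 + 1)) (q ++ [w]) ?_
      intro k hk
      rcases List.mem_append.mp hk with hk | hk
      · rw [PySem.Dict.contains_insert]
        simp [hq k hk]
      · rw [List.mem_singleton.mp hk]
        exact PySem.Dict.contains_insert_self _ _ _

theorem p1Run_mono (adj_list : List (Int × List Int)) :
    ∀ (f : Nat) (d : PySem.Dict Int Int) (pend : List Int) (k : Int),
      d.contains k = true →
      (p1Run adj_list f d pend).1.contains k = true ∧
        (p1Run adj_list f d pend).1.getD k 0 = d.getD k 0 := by
  intro f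
  induction f with
  | zero => intro d pend k hk; exact ⟨hk, rfl⟩
  | succ f ih =>
    intro d pend k hk
    cases pend with
    | nil => exact ⟨hk, rfl⟩
    | cons u rest =>
      simp only [p1Run]
      rcases p1Inner_mono u ((adj_list.lookup u).getD []) d rest k hk with ⟨h1, h2⟩
      rcases ih _ _ k h1 with ⟨h3, h4⟩
      exact ⟨h3, h4.trans h2⟩

theorem inner_sim (dfin : PySem.Dict Int Int) (u : Int) :
    ∀ (nbrs : List Int) (v : PySem.Dict Int Int) (p : PySem.Dict Int (List Int))
      (np : PySem.Dict Int Int) (q : List Int),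
      v.contains u = true →
      (∀ k, (p1Inner u nbrs v q).1.contains k = true →
        dfin.getD k 0 = (p1Inner u nbrs v q).1.getD k 0) →
      cspInner u nbrs (v, p, np) q =
        (((p1Inner u nbrs v q).1, p2Inner dfin u nbrs (p, np)), (p1Inner u nbrs v q).2) := by
  intro nbrs
  induction nbrs with
  | nil => intro v p np q _ _; rfl
  | cons x xs ih =>
    intro v p np q hu hfin
    have hdu : dfin.getD u 0 = v.getD u 0 := by
      rcases p1Inner_mono u (x :: xs) v q u hu with ⟨h1, h2⟩
      exact (hfin u h1).trans h2
    cases hx : v.contains x with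
    | true =>
      -- x already visited: dictionaries unchanged, both conditions compare the same values
      have hdx : dfin.getD x 0 = v.getD x 0 := by
        rcases p1Inner_mono u (x :: xs) v q x hx with ⟨h1, h2⟩
        exact (hfin x h1).trans h2
      simp only [p1Inner, hx, if_true] at hfin ⊢
      simp only [cspInner, p2Inner, hx, if_true]
      have hcond : (dfin.getD x 0 == dfin.getD u 0 + 1) = (v.getD x 0 == v.getD u 0 + 1) := by
        rw [hdx, hdu]
      rw [hcond]
      by_cases hc : (v.getD x 0 == v.getD u 0 + 1) = true
      · rw [if_pos hc, if_pos hc]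
        exact ih v _ _ q hu hfin
      · rw [if_neg hc, if_neg hc]
        exact ih v p np q hu hfin
    | false =>
      -- x freshly discovered: both insert, A's condition is trivially true, so is B's
      simp only [p1Inner, hx, Bool.false_eq_true, if_false] at hfin ⊢
      simp only [cspInner, p2Inner, hx, Bool.false_eq_true, if_false]
      have hxu : x ≠ u := fun h => by rw [h] at hx; rw [hu] at hx; cases hx
      have hv1u : (v.insert x (v.getD u 0 + 1)).contains u = true := by
        rw [PySem.Dict.contains_insert]; simp [hu]
      have hv1x : (v.insert x (v.getD u 0 + 1)).getD x 0 = v.getD u 0 + 1 :=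
        PySem.Dict.getD_insert_self _ _ _ _
      have hcondA : ((v.insert x (v.getD u 0 + 1)).getD x 0 == v.getD u 0 + 1) = true := by
        rw [hv1x]; exact beq_self_eq_true _
      have hdx : dfin.getD x 0 = v.getD u 0 + 1 := by
        rcases p1Inner_mono u xs (v.insert x (v.getD u 0 + 1)) (q ++ [x]) x
          (PySem.Dict.contains_insert_self _ _ _) with ⟨h1, h2⟩
        rw [hfin x h1, h2, hv1x]
      have hcondB : (dfin.getD x 0 == dfin.getD u 0 + 1) = true := by
        rw [hdx, hdu]; exact beq_self_eq_true _
      rw [if_pos hcondA, if_pos hcondB]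
      exact ih (v.insert x (v.getD u 0 + 1)) _ _ (q ++ [x]) hv1u hfin

theorem loop_sim (adj_list : List (Int × List Int)) :
    ∀ (f : Nat) (v : PySem.Dict Int Int) (p : PySem.Dict Int (List Int))
      (np : PySem.Dict Int Int) (q : List Int),
      (∀ k ∈ q, v.contains k = true) →
      cspLoop adj_list f (v, p, np) q =
        ((p1Run adj_list f v q).1,
         (p1Run adj_list f v q).2.foldl
           (fun s u => p2Inner (p1Run adj_list f v q).1 u ((adj_list.lookup u).getD []) s)
           (p, np)) := by
  intro f
  induction f with
  | zero => intro v p np q _; rfl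
  | succ f ih =>
    intro v p np q hq
    cases q with
    | nil => rfl
    | cons u rest =>
      have hu : v.contains u = true := hq u (List.mem_cons_self ..)
      have hrest : ∀ k ∈ rest, v.contains k = true :=
        fun k hk => hq k (List.mem_cons_of_mem _ hk)
      set nbrs := (adj_list.lookup u).getD [] with hnbrs
      set v' := (p1Inner u nbrs v rest).1 with hv'
      set rest' := (p1Inner u nbrs v rest).2 with hrest'
      have hfin : ∀ k, v'.contains k = true →
          (p1Run adj_list f v' rest').1.getD k 0 = v'.getD k 0 :=
        fun k hk => (p1Run_mono adj_list f v' rest' k hk).2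
      have hsim := inner_sim (p1Run adj_list f v' rest').1 u nbrs v p np rest hu hfin
      have hstep : cspLoop adj_list (f + 1) (v, p, np) (u :: rest) =
          cspLoop adj_list f (cspInner u nbrs (v, p, np) rest).1
            (cspInner u nbrs (v, p, np) rest).2 := rfl
      rw [hstep, hsim]
      have hq' : ∀ k ∈ rest', v'.contains k = true :=
        p1Inner_queue u nbrs v rest hrest
      have hrun : p1Run adj_list (f + 1) v (u :: rest) =
          ((p1Run adj_list f v' rest').1, u :: (p1Run adj_list f v' rest').2) := rfl
      rw [hrun]
      simp only [List.foldl_cons]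
      exact ih v' (p2Inner (p1Run adj_list f v' rest').1 u nbrs (p, np)).1
        (p2Inner (p1Run adj_list f v' rest').1 u nbrs (p, np)).2 rest' hq'

theorem ports_eq (root : Int) (adj_list : List (Int × List Int)) :
    compute_shortest_paths root adj_list = compute_shortest_paths_alt root adj_list := by
  simp only [compute_shortest_paths, compute_shortest_paths_alt]
  rw [p1Loop_eq_run]
  have hq : ∀ k ∈ ([root] : List Int),
      ((PySem.Dict.empty (κ := Int) (ν := Int)).insert root 0).contains k = true := by
    intro k hk
    rw [List.mem_singleton.mp hk]
    exact PySem.Dict.contains_insert_self _ _ _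
  rw [loop_sim adj_list (adj_list.foldl (fun a p => a + p.2.length) 0 + 1)
    ((PySem.Dict.empty).insert root 0) PySem.Dict.empty ((PySem.Dict.empty).insert root 1)
    [root] hq]
  simp

-- ===== VERDICT (by name: the statement is the Claim_ definition above) =====
theorem compute_shortest_paths_spec : Claim_equal_compute_shortest_paths := by
  intro root adj_list _ _
  unfold Spec_compute_shortest_paths
  exact ports_eq root adj_list
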